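-- pv_equiv track=rewrite | github.com/Jungho-Cheon/algorithm-python | Solutions/blackjack.py | blackjack_2
-- ===== SOURCE A (Python) =====
-- from itertools import combinations
--
-- def blackjack_2(data, cards_num, cards_sum):
--     all_list = list(combinations(data, 3))
--     result = 0
--     for i in range(len(all_list)):
--         current = 0
--         for j in range(3):
--             current += all_list[i][j]
--
--         if current <= cards_sum and current > result:
--             result = current
--
--     return result
-- ===== SOURCE B (Python) =====
-- def blackjack_2(data, cards_num, cards_sum):
--     # Sort, fix the smallest card of the triple, two-pointer scan for the best pair.
--     a = sorted(data)
--     n = len(a)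
--     best = 0
--     for i in range(n - 2):
--         l, r = i + 1, n - 1
--         while l < r:
--             s = a[i] + a[l] + a[r]
--             if s <= cards_sum:
--                 if best < s:
--                     best = s
--                 l += 1
--             else:
--                 r -= 1
--     return best
-- ===== Notes on version B (the rewrite author's own statement) =====
-- stated objective: faster
-- what changed: Replaces the brute-force enumeration of all 3-card combinations with sort + fix-one-card + two-pointer scan over the sorted list.
import Mathlib
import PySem

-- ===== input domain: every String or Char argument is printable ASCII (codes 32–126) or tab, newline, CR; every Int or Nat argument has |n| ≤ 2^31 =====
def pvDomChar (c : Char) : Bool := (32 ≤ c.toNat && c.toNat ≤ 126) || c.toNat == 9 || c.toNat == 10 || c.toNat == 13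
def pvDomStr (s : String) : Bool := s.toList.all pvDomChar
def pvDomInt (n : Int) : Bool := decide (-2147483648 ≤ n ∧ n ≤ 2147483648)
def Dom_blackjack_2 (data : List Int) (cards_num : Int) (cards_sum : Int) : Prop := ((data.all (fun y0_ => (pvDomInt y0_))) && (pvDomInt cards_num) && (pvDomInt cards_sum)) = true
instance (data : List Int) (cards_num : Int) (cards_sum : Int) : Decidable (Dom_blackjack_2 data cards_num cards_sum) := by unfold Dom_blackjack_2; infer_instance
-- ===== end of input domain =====

-- B replaces A's brute-force scan of all 3-card combinations by sort + two-pointer (O(n^2) vs O(n^3)).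


-- ===== PORT A =====
-- itertools.combinations(data, 2) / (data, 3), in itertools order
def pvComb2 : List Int → List (Int × Int)
  | [] => []
  | x :: rest => rest.map (fun y => (x, y)) ++ pvComb2 rest

def pvComb3 : List Int → List (Int × Int × Int)
  | [] => []
  | x :: rest => (pvComb2 rest).map (fun p => (x, p.1, p.2)) ++ pvComb3 rest

def blackjack_2 (data : List Int) (cards_num : Int) (cards_sum : Int) : Int :=
  let all_list := pvComb3 data
  all_list.foldl
    (fun result c =>
      let current := 0 + c.1 + c.2.1 + c.2.2   -- for j in range(3): current += all_list[i][j]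
      if current ≤ cards_sum ∧ result < current then current else result)
    0

-- ===== PORT B =====
-- the 'while l < r' two-pointer loop of Source B (indices are always in range; a.getD i 0 = a[i])
def pvInner (a : List Int) (t x : Int) (best : Int) (l r : Nat) : Int :=
  if _h : l < r then
    let s := x + a.getD l 0 + a.getD r 0
    if s ≤ t then pvInner a t x (if best < s then s else best) (l + 1) r
    else pvInner a t x best l (r - 1)
  else best
termination_by r - l
decreasing_by all_goals omega

def blackjack_2_alt (data : List Int) (cards_num : Int) (cards_sum : Int) : Int :=
  let a := PySem.List.sorted data (fun x => x) false
  let n := a.length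
  (List.range (n - 2)).foldl
    (fun best i => pvInner a cards_sum (a.getD i 0) best (i + 1) (n - 1)) 0

-- ===== PRECONDITION & SPEC =====
def Spec_blackjack_2 (data : List Int) (cards_num : Int) (cards_sum : Int) (out : Int) : Prop := out = blackjack_2_alt data cards_num cards_sum
instance (data : List Int) (cards_num : Int) (cards_sum : Int) (out : Int) : Decidable (Spec_blackjack_2 data cards_num cards_sum out) := by unfold Spec_blackjack_2; infer_instance

-- ===== CLAIM (what is proved, stated in full; the proofs are below) =====
def Claim_equal_blackjack_2 : Prop := ∀ (data : List Int) (cards_num : Int) (cards_sum : Int), Dom_blackjack_2 data cards_num cards_sum → Spec_blackjack_2 data cards_num cards_sum (blackjack_2 data cards_num cards_sum)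

-- ===== LEMMAS AND PROOFS =====

-- list of all pair sums x + l[p] + l[q] for p < q (proof-level spec)
def pvSums2 : List Int → List Int
  | [] => []
  | x :: rest => rest.map (fun y => x + y) ++ pvSums2 rest

def pvSums3 : List Int → List Int
  | [] => []
  | x :: rest => (pvSums2 rest).map (fun y => x + y) ++ pvSums3 rest

-- index-based pair sums on the segment [l, r]
def pvPairSums (a : List Int) (x : Int) (l r : Nat) : List Int :=
  if _h : l < r then
    (List.range' (l + 1) (r - l)).map (fun q => x + a.getD l 0 + a.getD q 0)
      ++ pvPairSums a x (l + 1) r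
  else []
termination_by r - l
decreasing_by omega

def pvBestLE (t : Int) (L : List Int) : Int := (L.filter (fun c => c ≤ t)).foldl max 0

-- ---------- A-side ----------

lemma map_sum_comb2 (l : List Int) : (pvComb2 l).map (fun p => p.1 + p.2) = pvSums2 l := by
  induction l with
  | nil => rfl
  | cons x rest ih => simp [pvComb2, pvSums2, ih, List.map_map, Function.comp]

lemma map_sum_comb3 (l : List Int) :
    (pvComb3 l).map (fun c => 0 + c.1 + c.2.1 + c.2.2) = pvSums3 l := by
  induction l with
  | nil => rfl
  | cons x rest ih =>
    simp only [pvComb3, pvSums3, List.map_append, List.map_map, ih, ← map_sum_comb2]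
    congr 1
    apply List.map_congr_left
    intro p _
    simp
    ring

lemma if_lt_eq_max {a b : Int} : (if a < b then b else a) = max a b := by
  split_ifs with h
  · exact (max_eq_right h.le).symm
  · exact (max_eq_left (not_lt.mp h)).symm

lemma foldl_update_eq_foldl_max (t : Int) (L : List Int) (acc : Int) :
    L.foldl (fun r c => if c ≤ t ∧ r < c then c else r) acc
      = (L.filter (fun c => c ≤ t)).foldl max acc := by
  induction L generalizing acc with
  | nil => rfl
  | cons c L ih =>
    by_cases h : c ≤ t
    · have hmax : (if c ≤ t ∧ acc < c then c else acc) = max acc c := by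
        rw [if_lt_eq_max.symm]
        simp [h]
      rw [List.foldl_cons, hmax, List.filter_cons_of_pos (by simpa using h), List.foldl_cons]
      exact ih _
    · rw [List.foldl_cons, if_neg (by tauto), List.filter_cons_of_neg (by simpa using h)]
      exact ih _

lemma blackjack_A_eq (data : List Int) (cn t : Int) :
    blackjack_2 data cn t = pvBestLE t (pvSums3 data) := by
  unfold blackjack_2 pvBestLE
  rw [show (pvComb3 data).foldl
        (fun result c =>
          if 0 + c.1 + c.2.1 + c.2.2 ≤ t ∧ result < 0 + c.1 + c.2.1 + c.2.2
          then 0 + c.1 + c.2.1 + c.2.2 else result) 0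
      = ((pvComb3 data).map (fun c => 0 + c.1 + c.2.1 + c.2.2)).foldl
          (fun r c => if c ≤ t ∧ r < c then c else r) 0 from by
        rw [List.foldl_map]]
  rw [map_sum_comb3, foldl_update_eq_foldl_max]

-- ---------- max-fold toolbox ----------

lemma foldl_max_perm {L1 L2 : List Int} (h : L1.Perm L2) (b : Int) :
    L1.foldl max b = L2.foldl max b :=
  h.foldl_eq b

lemma foldl_max_all_le {L : List Int} {c : Int} (h : ∀ y ∈ L, y ≤ c) :
    L.foldl max c = c := by
  induction L with
  | nil => rfl
  | cons y L ih =>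
    have hy : y ≤ c := h y (by simp)
    have : max c y = c := max_eq_left hy
    simp only [List.foldl_cons, this]
    exact ih (fun z hz => h z (by simp [hz]))

lemma foldl_max_of_max_mem {L : List Int} {s : Int} (b : Int)
    (hle : ∀ y ∈ L, y ≤ s) (hmem : s ∈ L) :
    L.foldl max b = max b s := by
  induction L generalizing b with
  | nil => simp at hmem
  | cons y L ih =>
    simp only [List.foldl_cons]
    rcases List.mem_cons.mp hmem with rfl | hmem'
    · by_cases hL : s ∈ L
      · rw [ih _ (fun z hz => hle z (by simp [hz])) hL, max_assoc, max_self]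
      · have : ∀ z ∈ L, z ≤ max b s := fun z hz => le_trans (hle z (by simp [hz])) (le_max_right _ _)
        rw [foldl_max_all_le this]
    · have hy : y ≤ s := hle y (by simp)
      rw [ih _ (fun z hz => hle z (by simp [hz])) hmem', max_assoc, max_eq_right hy]

lemma bestLE_perm {L1 L2 : List Int} (t : Int) (h : L1.Perm L2) :
    pvBestLE t L1 = pvBestLE t L2 := by
  unfold pvBestLE
  exact foldl_max_perm (h.filter _) 0

-- ---------- pairSums structure ----------

lemma range'_map_getD (a : List Int) (s k : Nat) (h : s + k ≤ a.length) :
    (List.range' s k).map (fun i => a.getD i 0) = (a.drop s).take k := by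
  apply List.ext_getElem
  · simp; omega
  · intro i h1 h2
    simp only [List.getElem_map, List.getElem_range', List.getElem_take, List.getElem_drop]
    rw [List.getD_eq_getElem?_getD, List.getElem?_eq_getElem (by simp at h1 ⊢; omega)]
    simp

lemma pairSums_shift (y : Int) (a : List Int) (x : Int) (l r : Nat) :
    pvPairSums (y :: a) x (l + 1) (r + 1) = pvPairSums a x l r := by
  induction hn : r - l using Nat.strong_induction_on generalizing l r with
  | _ n ih =>
    unfold pvPairSums
    by_cases h : l < r
    · simp only [dif_pos (show l + 1 < r + 1 by omega), dif_pos h]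
      congr 1
      · have : (r + 1 - (l + 1)) = r - l := by omega
        rw [this, show l + 1 + 1 = 1 + (l + 1) by omega, ← List.map_add_range']
        simp only [List.map_map]
        apply List.map_congr_left
        intro q _
        simp only [Function.comp_apply]
        rw [Nat.add_comm 1 q]
        simp [List.getD]
      · exact ih (r - (l + 1)) (by omega) (l + 1) r rfl
    · simp [dif_neg h]

lemma pairSums_full (a : List Int) (x : Int) :
    pvPairSums a x 0 (a.length - 1) = (pvSums2 a).map (fun y => x + y) := by
  induction a with
  | nil => simp [pvPairSums, pvSums2]
  | cons z rest ih =>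
    match rest with
    | [] => simp [pvPairSums, pvSums2]
    | w :: rs =>
      have hlen : (z :: w :: rs).length - 1 = (w :: rs).length := by simp
      rw [hlen]
      unfold pvPairSums
      have hlt : 0 < (w :: rs).length := by simp
      rw [dif_pos hlt]
      have h1 : (List.range' 1 ((w :: rs).length - 0)).map
            (fun q => x + (z :: w :: rs).getD 0 0 + (z :: w :: rs).getD q 0)
          = (w :: rs).map (fun y => x + z + y) := by
        have := range'_map_getD (z :: w :: rs) 1 (w :: rs).length (by simp only [List.length_cons]; omega)
        have h2 : (List.range' 1 ((w :: rs).length)).map (fun i => (z :: w :: rs).getD i 0)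
            = w :: rs := by
          rw [this]; simp
        calc (List.range' 1 ((w :: rs).length - 0)).map
              (fun q => x + (z :: w :: rs).getD 0 0 + (z :: w :: rs).getD q 0)
            = ((List.range' 1 ((w :: rs).length)).map (fun i => (z :: w :: rs).getD i 0)).map
                (fun y => x + z + y) := by
              simp [List.map_map, Function.comp, List.getD]
          _ = (w :: rs).map (fun y => x + z + y) := by rw [h2]
      have h3 : pvPairSums (z :: w :: rs) x (0 + 1) ((w :: rs).length - 1 + 1)
          = pvPairSums (w :: rs) x 0 ((w :: rs).length - 1) := pairSums_shift _ _ _ _ _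
      have h4 : (w :: rs).length = (w :: rs).length - 1 + 1 := by simp
      rw [h1, show (0 : Nat) + 1 = 1 from rfl] at *
      rw [show pvPairSums (z :: w :: rs) x 1 (w :: rs).length
            = pvPairSums (w :: rs) x 0 ((w :: rs).length - 1) by
          rw [h4]; exact h3]
      rw [ih]
      have hfun : (fun y => x + (z + y)) = (fun y => x + z + y) := by funext y; ring
      simp [pvSums2, List.map_map]
      ring

lemma flatMap_congr2 (L : List Nat) (f g : Nat → List Int) (h : ∀ i ∈ L, f i = g i) :
    L.flatMap f = L.flatMap g := by
  induction L with
  | nil => rfl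
  | cons i L ih =>
    simp only [List.flatMap_cons]
    rw [h i (by simp), ih (fun j hj => h j (by simp [hj]))]

-- flatMap of the outer loop's segments is exactly pvSums3 of the list
lemma flatMap_pairSums (a : List Int) :
    (List.range (a.length - 2)).flatMap
        (fun i => pvPairSums a (a.getD i 0) (i + 1) (a.length - 1))
      = pvSums3 a := by
  induction a with
  | nil => simp [pvSums3]
  | cons z rest ih =>
    match rest with
    | [] => simp [pvSums3, pvSums2]
    | [w] => simp [pvSums3, pvSums2]
    | w :: u :: rs =>
      have hlen : (z :: w :: u :: rs).length - 2 = (w :: u :: rs).length - 2 + 1 := by simp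
      rw [hlen, List.range_succ_eq_map]
      simp only [List.flatMap_cons, List.flatMap_map]
      have hz : pvPairSums (z :: w :: u :: rs) ((z :: w :: u :: rs).getD 0 0) (0 + 1)
            ((z :: w :: u :: rs).length - 1)
          = (pvSums2 (w :: u :: rs)).map (fun y => z + y) := by
        have h4 : (z :: w :: u :: rs).length - 1 = ((w :: u :: rs).length - 1) + 1 := by simp
        rw [h4, show (0:Nat) + 1 = 0 + 1 from rfl, pairSums_shift, pairSums_full]
        rfl
      have hrest : ∀ i,
          pvPairSums (z :: w :: u :: rs) ((z :: w :: u :: rs).getD (i + 1) 0) (i + 1 + 1)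
              ((z :: w :: u :: rs).length - 1)
            = pvPairSums (w :: u :: rs) ((w :: u :: rs).getD i 0) (i + 1)
              ((w :: u :: rs).length - 1) := by
        intro i
        have h4 : (z :: w :: u :: rs).length - 1 = ((w :: u :: rs).length - 1) + 1 := by simp
        rw [h4, pairSums_shift]
        rfl
      rw [hz]
      conv_rhs => rw [pvSums3]
      congr 1
      rw [← ih]
      apply flatMap_congr2
      intro i _
      exact hrest i

-- ---------- inner loop correctness ----------

lemma sorted_getD_mono (a : List Int) (hs : a.Pairwise (· ≤ ·)) {p q : Nat}
    (hpq : p ≤ q) (hq : q < a.length) : a.getD p 0 ≤ a.getD q 0 := by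
  rcases Nat.eq_or_lt_of_le hpq with rfl | hlt
  · exact le_refl _
  · have := (List.pairwise_iff_getElem.mp hs) p q (by omega) hq hlt
    rw [List.getD_eq_getElem?_getD, List.getElem?_eq_getElem (by omega),
        List.getD_eq_getElem?_getD, List.getElem?_eq_getElem hq]
    simpa using this

lemma pairSums_split_right (a : List Int) (x : Int) (l r : Nat) (h : l < r) :
    (pvPairSums a x l r).Perm
      (pvPairSums a x l (r - 1)
        ++ (List.range' l (r - l)).map (fun p => x + a.getD p 0 + a.getD r 0)) := by
  induction hn : r - l using Nat.strong_induction_on generalizing l with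
  | _ n ih =>
    rw [pvPairSums, dif_pos h]
    by_cases h2 : l + 1 < r
    · have hperm := ih (r - (l + 1)) (by omega) (l + 1) h2 rfl
      have hrow : List.range' (l + 1) (r - l)
          = List.range' (l + 1) (r - 1 - l) ++ [r] := by
        have he : r - l = (r - 1 - l) + 1 := by omega
        rw [he, List.range'_1_concat]
        congr 2
        omega
      have hps : pvPairSums a x l (r - 1)
          = (List.range' (l + 1) (r - 1 - l)).map (fun q => x + a.getD l 0 + a.getD q 0)
            ++ pvPairSums a x (l + 1) (r - 1) := by
        rw [pvPairSums, dif_pos (by omega)]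
      have hcol : (List.range' l n).map (fun p => x + a.getD p 0 + a.getD r 0)
          = (x + a.getD l 0 + a.getD r 0)
            :: (List.range' (l + 1) (r - (l + 1))).map (fun p => x + a.getD p 0 + a.getD r 0) := by
        have hn2 : n = (r - (l + 1)) + 1 := by omega
        rw [hn2, List.range'_succ]
        simp
      refine ((List.Perm.refl _).append hperm).trans ?_
      rw [hrow, hps, hcol]
      refine List.perm_iff_count.mpr ?_
      intro c
      simp only [List.count_append, List.count_cons, List.map_append, List.map_cons,
        List.map_nil, List.count_nil]
      ring
    · have hr : r = l + 1 := by omega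
      subst hr
      have hn1 : n = 1 := by omega
      subst hn1
      simp [pvPairSums, List.range']

lemma inner_eq (a : List Int) (t x : Int) (hs : a.Pairwise (· ≤ ·)) :
    ∀ (l r : Nat) (best : Int), r < a.length →
      pvInner a t x best l r
        = ((pvPairSums a x l r).filter (fun c => c ≤ t)).foldl max best := by
  intro l r
  induction hn : r - l using Nat.strong_induction_on generalizing l r with
  | _ n ih =>
    intro best hr
    by_cases h : l < r
    · rw [pvInner, dif_pos h]
      set s := x + a.getD l 0 + a.getD r 0 with hsdef
      by_cases hle : s ≤ t
      · rw [if_pos hle, ih (r - (l + 1)) (by omega) (l + 1) r rfl _ hr]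
        conv_rhs => rw [pvPairSums]
        rw [dif_pos h, List.filter_append, List.foldl_append]
        congr 1
        have hrow_le : ∀ y ∈ (List.range' (l + 1) (r - l)).map
            (fun q => x + a.getD l 0 + a.getD q 0), y ≤ s := by
          intro y hy
          simp only [List.mem_map, List.mem_range'_1] at hy
          obtain ⟨q, ⟨hq1, hq2⟩, rfl⟩ := hy
          have : a.getD q 0 ≤ a.getD r 0 :=
            sorted_getD_mono a hs (by omega) hr
          rw [hsdef]
          omega
        have hfilter : ((List.range' (l + 1) (r - l)).map
            (fun q => x + a.getD l 0 + a.getD q 0)).filter (fun c => c ≤ t)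
            = (List.range' (l + 1) (r - l)).map (fun q => x + a.getD l 0 + a.getD q 0) := by
          apply List.filter_eq_self.mpr
          intro y hy
          exact decide_eq_true (le_trans (hrow_le y hy) hle)
        rw [hfilter]
        have hmem : s ∈ (List.range' (l + 1) (r - l)).map
            (fun q => x + a.getD l 0 + a.getD q 0) := by
          simp only [List.mem_map, List.mem_range'_1]
          exact ⟨r, ⟨by omega, by omega⟩, rfl⟩
        rw [foldl_max_of_max_mem best hrow_le hmem, if_lt_eq_max]
      · rw [if_neg hle, ih (r - 1 - l) (by omega) l (r - 1) rfl _ (by omega)]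
        have hperm := (pairSums_split_right a x l r h).filter (fun c => c ≤ t)
        rw [foldl_max_perm hperm best]
        rw [List.filter_append, List.foldl_append]
        have hcol : ((List.range' l (r - l)).map
            (fun p => x + a.getD p 0 + a.getD r 0)).filter (fun c => c ≤ t) = [] := by
          apply List.filter_eq_nil_iff.mpr
          intro y hy
          simp only [List.mem_map, List.mem_range'_1] at hy
          obtain ⟨p, ⟨hp1, hp2⟩, rfl⟩ := hy
          have : a.getD l 0 ≤ a.getD p 0 :=
            sorted_getD_mono a hs hp1 (by omega)
          simp only [decide_eq_true_eq]
          rw [hsdef] at hle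
          omega
        rw [hcol]
        rfl
    · rw [pvInner, dif_neg h]
      conv_rhs => rw [pvPairSums]
      rw [dif_neg h]
      rfl

-- foldl over flatMap
lemma foldl_max_flatMap (f : Nat → List Int) (L : List Nat) (b : Int) :
    L.foldl (fun acc i => (f i).foldl max acc) b = (L.flatMap f).foldl max b := by
  induction L generalizing b with
  | nil => rfl
  | cons i L ih => simp [List.flatMap_cons, List.foldl_append, ih]

lemma filter_flatMap' (L : List Nat) (f : Nat → List Int) (p : Int → Bool) :
    (L.flatMap f).filter p = L.flatMap (fun i => (f i).filter p) := by
  induction L with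
  | nil => rfl
  | cons i L ih => simp [List.flatMap_cons, List.filter_append, ih]

lemma blackjack_B_eq (data : List Int) (cn t : Int) :
    blackjack_2_alt data cn t
      = pvBestLE t (pvSums3 (PySem.List.sorted data (fun x => x) false)) := by
  unfold blackjack_2_alt
  set a := PySem.List.sorted data (fun x => x) false with ha
  have hs : a.Pairwise (· ≤ ·) := by
    simpa using PySem.List.sorted_pairwise (xs := data) (key := fun x : Int => x)
  have hcongr : (List.range (a.length - 2)).foldl
        (fun best i => pvInner a t (a.getD i 0) best (i + 1) (a.length - 1)) 0
      = (List.range (a.length - 2)).foldl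
        (fun best i =>
          ((pvPairSums a (a.getD i 0) (i + 1) (a.length - 1)).filter (fun c => c ≤ t)).foldl
            max best) 0 := by
    apply PySem.List.foldl_congr_mem
    intro best i hi
    have hi3 : i < a.length - 2 := List.mem_range.mp hi
    exact inner_eq a t (a.getD i 0) hs (i + 1) (a.length - 1) best (by omega)
  rw [hcongr,
    foldl_max_flatMap (fun i => (pvPairSums a (a.getD i 0) (i + 1) (a.length - 1)).filter (fun c => c ≤ t)) _ 0,
    ← filter_flatMap', flatMap_pairSums]
  rfl

-- permutation invariance of the pair/triple sum lists
lemma perm_sums2 {l1 l2 : List Int} (h : l1.Perm l2) : (pvSums2 l1).Perm (pvSums2 l2) := by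
  induction h with
  | nil => exact List.Perm.refl _
  | cons x _ ih => exact ((List.Perm.map _ (by assumption)).append ih)
  | swap x y l =>
    simp only [pvSums2, List.map_cons]
    refine List.perm_iff_count.mpr ?_
    intro c
    simp only [List.count_append, List.count_cons]
    have hxy : y + x = x + y := by ring
    rw [hxy]
    ring
  | trans _ _ ih1 ih2 => exact ih1.trans ih2

lemma perm_sums3 {l1 l2 : List Int} (h : l1.Perm l2) : (pvSums3 l1).Perm (pvSums3 l2) := by
  induction h with
  | nil => exact List.Perm.refl _
  | cons x h ih => exact ((perm_sums2 h).map _).append ih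
  | swap x y l =>
    simp only [pvSums3, pvSums2, List.map_append, List.map_map]
    refine List.perm_iff_count.mpr ?_
    intro c
    have hcomp : ((fun w => y + w) ∘ fun w => x + w) = ((fun w => x + w) ∘ fun w => y + w) := by
      funext w
      simp only [Function.comp_apply]
      ring
    simp only [List.count_append]
    rw [hcomp]
    ring
  | trans _ _ ih1 ih2 => exact ih1.trans ih2

-- ===== VERDICT (by name: the statement is the Claim_ definition above) =====
theorem blackjack_2_spec : Claim_equal_blackjack_2 := by
  intro data cn t _
  unfold Spec_blackjack_2
  rw [blackjack_A_eq, blackjack_B_eq]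
  exact bestLE_perm t (perm_sums3 (PySem.List.sorted_perm _ _ _).symm)
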